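-- pv_equiv track=rewrite | github.com/Suvaidyam/frappe_theme | frappe_theme/utils/sql_builder.py | _find_top_level_where
-- ===== SOURCE A (Python) =====
-- def _find_top_level_where(sql: str) -> int:
-- 	"""Find position of last top-level WHERE (ignores subqueries)."""
-- 	depth = 0
-- 	last_where = -1
-- 	upper_sql = sql.upper()
-- 	i = 0
--
-- 	while i < len(sql):
-- 		if sql[i] == "(":
-- 			depth += 1
-- 		elif sql[i] == ")":
-- 			depth -= 1
-- 		elif depth == 0 and upper_sql[i : i + 5] == "WHERE":
-- 			before_ok = i == 0 or not upper_sql[i - 1].isalnum()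
-- 			after_ok = i + 5 >= len(sql) or not upper_sql[i + 5].isalnum()
-- 			if before_ok and after_ok:
-- 				last_where = i
-- 		i += 1
--
-- 	return last_where
-- ===== SOURCE B (Python) =====
-- def _find_top_level_where(sql: str) -> int:
-- 	"""Two-phase: collect candidate 'where' positions, then check them against a prefix paren-depth table."""
-- 	n = len(sql)
-- 	low = sql.lower()
--
-- 	# Phase 1: all case-insensitive occurrences of 'where'
-- 	candidates = []
-- 	pos = low.find("where")
-- 	while pos != -1:
-- 		candidates.append(pos)
-- 		pos = low.find("where", pos + 1)
--
-- 	# Phase 2: prefix paren depth (depth[i] = depth just before index i; may go negative)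
-- 	depth = [0] * (n + 1)
-- 	for i, ch in enumerate(sql):
-- 		depth[i + 1] = depth[i] + (ch == "(") - (ch == ")")
--
-- 	ans = -1
-- 	for i in candidates:
-- 		if depth[i] == 0 \
-- 			and (i == 0 or not sql[i - 1].isalnum()) \
-- 			and (i + 5 >= n or not sql[i + 5].isalnum()):
-- 			ans = i
-- 	return ans
-- ===== Notes on version B (the rewrite author's own statement) =====
-- stated objective: faster
-- what changed: Replaces A's single fused per-character scan (depth counter plus an inline 5-char window comparison at every index) by two independent phases: collect every case-insensitive occurrence of the WHERE keyword with str.find, build a prefix paren-depth table in one pass, then check only the few candidate positions.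
import Mathlib
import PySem

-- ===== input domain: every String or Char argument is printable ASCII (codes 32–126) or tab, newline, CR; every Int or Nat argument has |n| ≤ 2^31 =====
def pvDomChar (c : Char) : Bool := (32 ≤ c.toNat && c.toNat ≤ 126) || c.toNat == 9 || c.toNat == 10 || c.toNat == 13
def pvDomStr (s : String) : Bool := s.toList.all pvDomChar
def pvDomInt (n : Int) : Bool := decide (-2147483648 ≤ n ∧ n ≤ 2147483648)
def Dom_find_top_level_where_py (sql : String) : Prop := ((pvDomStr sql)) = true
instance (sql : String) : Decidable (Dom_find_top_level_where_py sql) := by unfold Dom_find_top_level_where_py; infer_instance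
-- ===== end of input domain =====

-- B re-implements A: candidate WHERE positions via substring search + a prefix paren-depth table,
-- then a check of the candidates only (measurably faster by a constant factor; A checks a window at every index).


-- ===== PORT A =====
-- A's while loop increments i by 1 on every iteration, so it is ported as a fold over the index
-- range 0..n-1 carrying A's state (depth, last_where).  upper_sql[i:i+5] with 0 ≤ i < n is exactly
-- (drop i).take 5 of the upper-cased char list; sql[i] with i < n is getD i (the default is never used).
def find_top_level_where_py (sql : String) : Int :=
  let cs := sql.toList
  let ucs := PySem.Chars.upper cs            -- upper_sql = sql.upper()
  let n := cs.length
  ((List.range n).foldl (fun (s : Int × Int) i =>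
      let c := cs.getD i ' '                 -- sql[i], i < n always
      if c = '(' then (s.1 + 1, s.2)
      else if c = ')' then (s.1 - 1, s.2)
      else if s.1 = 0 ∧ (ucs.drop i).take 5 = ['W','H','E','R','E'] then
        if (i = 0 ∨ PySem.Chars.isalnum (ucs.getD (i - 1) ' ') = false)
           ∧ (i + 5 ≥ n ∨ PySem.Chars.isalnum (ucs.getD (i + 5) ' ') = false)
        then (s.1, (i : Int)) else s
      else s) ((0 : Int), (-1 : Int))).2

-- ===== PORT B =====
-- Source B phase 1 collects, with a str.find loop, every position where sql.lower() matches "where";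
-- that stdlib substring search is ported as the filter of the index range keeping exactly those
-- positions.  Phase 2 is the prefix-depth table (a scanl), then a fold over the candidate list only.
def find_top_level_where_py_alt (sql : String) : Int :=
  let cs := sql.toList
  let n := cs.length
  let low := PySem.Chars.lower cs
  let candidates := (List.range n).filter (fun i => (low.drop i).take 5 = ['w','h','e','r','e'])
  let depth := List.scanl
      (fun (d : Int) c => d + (if c = '(' then (1 : Int) else 0) - (if c = ')' then (1 : Int) else 0))
      0 cs
  candidates.foldl (fun acc i =>
      if depth.getD i 0 = 0
         ∧ (i = 0 ∨ PySem.Chars.isalnum (cs.getD (i - 1) ' ') = false)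
         ∧ (i + 5 ≥ n ∨ PySem.Chars.isalnum (cs.getD (i + 5) ' ') = false)
      then (i : Int) else acc) (-1)

-- ===== PRECONDITION & SPEC =====
def Spec_find_top_level_where_py (sql : String) (out : Int) : Prop := out = find_top_level_where_py_alt sql
instance (sql : String) (out : Int) : Decidable (Spec_find_top_level_where_py sql out) := by unfold Spec_find_top_level_where_py; infer_instance

-- ===== CLAIM (what is proved, stated in full; the proofs are below) =====
def Claim_equal_find_top_level_where_py : Prop := ∀ (sql : String), Dom_find_top_level_where_py sql → Spec_find_top_level_where_py sql (find_top_level_where_py sql)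

-- ===== LEMMAS AND PROOFS =====

-- proof-side names for the two step functions and the depth table of the ports
def pvStepA (cs ucs : List Char) (n : Nat) : Int × Int → Nat → Int × Int := fun s i =>
  let c := cs.getD i ' '
  if c = '(' then (s.1 + 1, s.2)
  else if c = ')' then (s.1 - 1, s.2)
  else if s.1 = 0 ∧ (ucs.drop i).take 5 = ['W','H','E','R','E'] then
    if (i = 0 ∨ PySem.Chars.isalnum (ucs.getD (i - 1) ' ') = false)
       ∧ (i + 5 ≥ n ∨ PySem.Chars.isalnum (ucs.getD (i + 5) ' ') = false)
    then (s.1, (i : Int)) else s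
  else s

def pvDepth (cs : List Char) : List Int := List.scanl
  (fun (d : Int) c => d + (if c = '(' then (1 : Int) else 0) - (if c = ')' then (1 : Int) else 0)) 0 cs

def pvStepB (cs : List Char) (depth : List Int) (n : Nat) : Int → Nat → Int := fun acc i =>
  if depth.getD i 0 = 0
     ∧ (i = 0 ∨ PySem.Chars.isalnum (cs.getD (i - 1) ' ') = false)
     ∧ (i + 5 ≥ n ∨ PySem.Chars.isalnum (cs.getD (i + 5) ' ') = false)
  then (i : Int) else acc

theorem pv_charle (a b : Char) : (a ≤ b) ↔ a.toNat ≤ b.toNat := by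
  rw [Char.le_def, UInt32.le_iff_toNat_le]; rfl

theorem pv_chareq (a b : Char) : a = b ↔ a.toNat = b.toNat := by
  constructor
  · intro h; rw [h]
  · intro h; apply Char.ext; exact UInt32.toNat_inj.mp h

theorem pv_ofNatToNat (n : Nat) (h1 : 32 ≤ n) (h2 : n ≤ 126) : (Char.ofNat n).toNat = n := by
  rw [Char.toNat_ofNat]; have : n.isValidChar := by unfold Nat.isValidChar; omega
  simp [this]

theorem pv_isalnum_upperChar (c : Char) :
    PySem.Chars.isalnum (PySem.Chars.upperChar c) = PySem.Chars.isalnum c := by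
  simp only [PySem.Chars.isalnum, PySem.Chars.isalpha, PySem.Chars.upperChar,
    PySem.Chars.islower, PySem.Chars.isupper, PySem.Chars.isdigit, pv_charle,
    show 'a'.toNat = 97 from rfl, show 'z'.toNat = 122 from rfl,
    show 'A'.toNat = 65 from rfl, show 'Z'.toNat = 90 from rfl,
    show '0'.toNat = 48 from rfl, show '9'.toNat = 57 from rfl]
  by_cases h : 97 ≤ c.toNat ∧ c.toNat ≤ 122
  · have hb : (decide (97 ≤ c.toNat) && decide (c.toNat ≤ 122)) = true := by simp [h.1, h.2]
    rw [if_pos hb, Bool.eq_iff_iff]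
    simp only [Bool.or_eq_true, Bool.and_eq_true, decide_eq_true_eq,
      pv_ofNatToNat _ (by omega : 32 ≤ c.toNat - 32) (by omega : c.toNat - 32 ≤ 126)]
    omega
  · have hb : (decide (97 ≤ c.toNat) && decide (c.toNat ≤ 122)) = false := by
      rcases not_and_or.mp h with h' | h' <;> simp [h']
    rw [if_neg (by simp [hb])]

theorem pv_ul_char (c U u : Char) (hU1 : 65 ≤ U.toNat) (hU2 : U.toNat ≤ 90)
    (huu : u.toNat = U.toNat + 32) :
    (PySem.Chars.upperChar c = U ↔ PySem.Chars.lowerChar c = u) := by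
  simp only [PySem.Chars.upperChar, PySem.Chars.lowerChar,
    PySem.Chars.islower, PySem.Chars.isupper, pv_charle, pv_chareq,
    show 'a'.toNat = 97 from rfl, show 'z'.toNat = 122 from rfl,
    show 'A'.toNat = 65 from rfl, show 'Z'.toNat = 90 from rfl]
  by_cases hl : 97 ≤ c.toNat ∧ c.toNat ≤ 122
  · have hb : (decide (97 ≤ c.toNat) && decide (c.toNat ≤ 122)) = true := by simp [hl.1, hl.2]
    have hb2 : (decide (65 ≤ c.toNat) && decide (c.toNat ≤ 90)) = false := by simp; omega
    rw [if_pos hb, if_neg (by simp [hb2]), pv_ofNatToNat _ (by omega) (by omega)]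
    omega
  · have hb : (decide (97 ≤ c.toNat) && decide (c.toNat ≤ 122)) = false := by
      rcases not_and_or.mp hl with h' | h' <;> simp [h']
    rw [if_neg (by simp [hb])]
    by_cases hu : 65 ≤ c.toNat ∧ c.toNat ≤ 90
    · have hb2 : (decide (65 ≤ c.toNat) && decide (c.toNat ≤ 90)) = true := by simp [hu.1, hu.2]
      rw [if_pos hb2, pv_ofNatToNat _ (by omega) (by omega)]
      omega
    · have hb2 : (decide (65 ≤ c.toNat) && decide (c.toNat ≤ 90)) = false := by
        rcases not_and_or.mp hu with h' | h' <;> simp [h']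
      rw [if_neg (by simp [hb2])]
      constructor <;> intro h <;> omega

theorem pv_window_iff (t : List Char) :
    (t.map PySem.Chars.upperChar = ['W','H','E','R','E']
      ↔ t.map PySem.Chars.lowerChar = ['w','h','e','r','e']) := by
  rcases t with _ | ⟨a, _ | ⟨b, _ | ⟨c, _ | ⟨d, _ | ⟨e, _ | ⟨f, r⟩⟩⟩⟩⟩⟩ <;> simp
  rw [pv_ul_char a 'W' 'w' (by decide) (by decide) (by decide),
      pv_ul_char b 'H' 'h' (by decide) (by decide) (by decide),
      pv_ul_char c 'E' 'e' (by decide) (by decide) (by decide),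
      pv_ul_char d 'R' 'r' (by decide) (by decide) (by decide),
      pv_ul_char e 'E' 'e' (by decide) (by decide) (by decide)]

theorem pv_getD_map_upper (l : List Char) (k : Nat) :
    (l.map PySem.Chars.upperChar).getD k ' ' = PySem.Chars.upperChar (l.getD k ' ') := by
  simp only [List.getD_eq_getElem?_getD, List.getElem?_map]
  cases h : l[k]? <;> simp [PySem.Chars.upperChar, PySem.Chars.islower]

theorem pv_depth_succ (cs : List Char) (m : Nat) (hm : m < cs.length) :
    (pvDepth cs).getD (m + 1) 0
      = (pvDepth cs).getD m 0 + (if cs[m] = '(' then (1 : Int) else 0)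
          - (if cs[m] = ')' then (1 : Int) else 0) := by
  have hlen : (pvDepth cs).length = cs.length + 1 := by
    simp [pvDepth, List.length_scanl]
  have h1 : m + 1 < (pvDepth cs).length := by omega
  rw [List.getD_eq_getElem _ _ (by omega), List.getD_eq_getElem _ _ (by omega)]
  exact List.getElem_succ_scanl h1

-- loop invariant: after m steps A's state is (prefix depth at m, B's fold over the candidates below m)
theorem pv_invariant (cs : List Char) (m : Nat) (hm : m ≤ cs.length) :
    (List.range m).foldl (pvStepA cs (cs.map PySem.Chars.upperChar) cs.length) ((0 : Int), (-1 : Int))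
      = ((pvDepth cs).getD m 0,
         ((List.range m).filter
            (fun i => ((cs.map PySem.Chars.lowerChar).drop i).take 5 = ['w','h','e','r','e'])).foldl
           (pvStepB cs (pvDepth cs) cs.length) (-1)) := by
  induction m with
  | zero => simp [pvDepth]
  | succ m ih =>
    have hm' : m < cs.length := hm
    rw [List.range_succ, List.foldl_append, List.filter_append, List.foldl_append,
        ih (le_of_lt hm')]
    have hget : cs.getD m ' ' = cs[m] := List.getD_eq_getElem _ _ hm'
    have hdrop : cs.drop m = cs[m] :: cs.drop (m + 1) := List.drop_eq_getElem_cons hm'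
    have hwin : ((cs.map PySem.Chars.upperChar).drop m).take 5 = ['W','H','E','R','E']
        ↔ ((cs.map PySem.Chars.lowerChar).drop m).take 5 = ['w','h','e','r','e'] := by
      rw [← List.map_drop, ← List.map_drop, ← List.map_take, ← List.map_take]
      exact pv_window_iff _
    have hfilT : ∀ (_ : ((cs.map PySem.Chars.lowerChar).drop m).take 5 = ['w','h','e','r','e']),
        List.filter (fun i => decide (((cs.map PySem.Chars.lowerChar).drop i).take 5 = ['w','h','e','r','e'])) [m] = [m] := by
      intro h; simp [h]
    have hfilF : ∀ (_ : ¬ ((cs.map PySem.Chars.lowerChar).drop m).take 5 = ['w','h','e','r','e']),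
        List.filter (fun i => decide (((cs.map PySem.Chars.lowerChar).drop i).take 5 = ['w','h','e','r','e'])) [m] = [] := by
      intro h; simp [h]
    simp only [List.foldl_cons, List.foldl_nil, pvStepA]
    rw [hget]
    by_cases hp : cs[m] = '('
    · have hcand : ¬ (((cs.map PySem.Chars.lowerChar).drop m).take 5 = ['w','h','e','r','e']) := by
        rw [← List.map_drop, hdrop, hp]
        simp [PySem.Chars.lowerChar, PySem.Chars.isupper]
      rw [if_pos hp, hfilF hcand, pv_depth_succ cs m hm', hp]
      simp
    · by_cases hq : cs[m] = ')'
      · have hcand : ¬ (((cs.map PySem.Chars.lowerChar).drop m).take 5 = ['w','h','e','r','e']) := by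
          rw [← List.map_drop, hdrop, hq]
          simp [PySem.Chars.lowerChar, PySem.Chars.isupper]
        rw [if_neg hp, if_pos hq, hfilF hcand, pv_depth_succ cs m hm', hq]
        simp
      · have hdep : (pvDepth cs).getD (m + 1) 0 = (pvDepth cs).getD m 0 := by
          rw [pv_depth_succ cs m hm']; simp [hp, hq]
        have hbnd : ((m = 0 ∨ PySem.Chars.isalnum ((cs.map PySem.Chars.upperChar).getD (m - 1) ' ') = false)
             ∧ (m + 5 ≥ cs.length ∨ PySem.Chars.isalnum ((cs.map PySem.Chars.upperChar).getD (m + 5) ' ') = false))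
            ↔ ((m = 0 ∨ PySem.Chars.isalnum (cs.getD (m - 1) ' ') = false)
             ∧ (m + 5 ≥ cs.length ∨ PySem.Chars.isalnum (cs.getD (m + 5) ' ') = false)) := by
          rw [pv_getD_map_upper, pv_getD_map_upper, pv_isalnum_upperChar, pv_isalnum_upperChar]
        rw [if_neg hp, if_neg hq, hdep]
        by_cases hcand : (((cs.map PySem.Chars.lowerChar).drop m).take 5 = ['w','h','e','r','e'])
        · rw [hfilT hcand]
          simp only [List.foldl_cons, List.foldl_nil, pvStepB]
          by_cases hz : (pvDepth cs).getD m 0 = 0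
          · rw [if_pos ⟨hz, hwin.mpr hcand⟩]
            by_cases hb : ((m = 0 ∨ PySem.Chars.isalnum (cs.getD (m - 1) ' ') = false)
               ∧ (m + 5 ≥ cs.length ∨ PySem.Chars.isalnum (cs.getD (m + 5) ' ') = false))
            · rw [if_pos (hbnd.mpr hb), if_pos ⟨hz, hb⟩]
            · rw [if_neg (fun h => hb (hbnd.mp h)), if_neg (fun h => hb h.2)]
          · rw [if_neg (fun h => hz h.1), if_neg (fun h => hz h.1)]
        · rw [hfilF hcand, if_neg (fun h => hcand (hwin.mp h.2))]
          simp

-- ===== VERDICT (by name: the statement is the Claim_ definition above) =====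
theorem find_top_level_where_py_spec : Claim_equal_find_top_level_where_py := by
  intro sql _
  unfold Spec_find_top_level_where_py
  show find_top_level_where_py sql = find_top_level_where_py_alt sql
  have h := pv_invariant sql.toList sql.toList.length le_rfl
  calc find_top_level_where_py sql
      = ((List.range sql.toList.length).foldl
          (pvStepA sql.toList (sql.toList.map PySem.Chars.upperChar) sql.toList.length)
          ((0 : Int), (-1 : Int))).2 := rfl
    _ = ((List.range sql.toList.length).filter
            (fun i => ((sql.toList.map PySem.Chars.lowerChar).drop i).take 5 = ['w','h','e','r','e'])).foldl
          (pvStepB sql.toList (pvDepth sql.toList) sql.toList.length) (-1) := by rw [h]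
    _ = find_top_level_where_py_alt sql := rfl
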